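-- pv_equiv track=rewrite | github.com/Ach018040/idol-platform | crawler/ics_sync.py | parse_ics
-- ===== SOURCE A (Python) =====
-- def parse_ics(text):
--     events = []
--     current = {}
--
--     for line in text.splitlines():
--         line = line.strip()
--
--         if line == "BEGIN:VEVENT":
--             current = {}
--         elif line == "END:VEVENT":
--             events.append(current)
--         else:
--             if ":" in line:
--                 key, value = line.split(":", 1)
--                 key = key.split(";")[0]
--                 current[key] = value
--
--     parsed = []
--     for e in events:
--         parsed.append({
--             "source_id": e.get("UID"),
--             "title": e.get("SUMMARY"),
--             "event_date": e.get("DTSTART"),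
--             "end_time": e.get("DTEND"),
--             "venue": e.get("LOCATION"),
--             "description": e.get("DESCRIPTION"),
--         })
--
--     return parsed
-- ===== SOURCE B (Python) =====
-- def parse_ics(text):
--     # One-pass parser: track the six fields of interest in plain variables,
--     # reset them at BEGIN:VEVENT and emit a record at each END:VEVENT.
--     parsed = []
--     uid = summary = dtstart = dtend = location = description = None
--     for raw in text.splitlines():
--         line = raw.strip()
--         if line == "BEGIN:VEVENT":
--             uid = summary = dtstart = dtend = location = description = None
--         elif line == "END:VEVENT":
--             parsed.append({
--                 "source_id": uid,
--                 "title": summary,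
--                 "event_date": dtstart,
--                 "end_time": dtend,
--                 "venue": location,
--                 "description": description,
--             })
--         elif ":" in line:
--             key, value = line.split(":", 1)
--             key = key.split(";")[0]
--             if key == "UID":
--                 uid = value
--             elif key == "SUMMARY":
--                 summary = value
--             elif key == "DTSTART":
--                 dtstart = value
--             elif key == "DTEND":
--                 dtend = value
--             elif key == "LOCATION":
--                 location = value
--             elif key == "DESCRIPTION":
--                 description = value
--     return parsed
-- ===== Notes on version B (the rewrite author's own statement) =====
-- stated objective: simpler
-- what changed: Replaces the two-pass parser (state machine filling a shared dict of all keys, then a reshaping loop) by a single pass that keeps only the six wanted fields in plain variables and emits each record at END:VEVENT; Pre_ excludes malformed texts where one of the six property lines appears after an END:VEVENT and before the next BEGIN:VEVENT, since such lines belong to no event and A (whose appended dicts are still live) and B (which has already emitted the record) may place them differently.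
import Mathlib
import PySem

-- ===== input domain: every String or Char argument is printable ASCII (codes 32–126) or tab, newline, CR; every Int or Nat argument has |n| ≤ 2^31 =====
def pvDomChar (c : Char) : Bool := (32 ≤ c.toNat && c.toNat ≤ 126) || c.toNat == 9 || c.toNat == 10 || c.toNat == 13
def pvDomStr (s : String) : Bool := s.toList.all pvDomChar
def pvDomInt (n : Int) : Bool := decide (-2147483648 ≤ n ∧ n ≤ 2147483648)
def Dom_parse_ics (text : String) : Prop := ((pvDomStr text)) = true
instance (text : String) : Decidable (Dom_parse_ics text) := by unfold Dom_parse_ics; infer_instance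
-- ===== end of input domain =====

-- B is a single pass keeping the six wanted fields in plain variables, emitting each record
-- at END:VEVENT, instead of A's two passes over a shared dict; neither mutates its argument.

-- key/value extraction shared by both ports: line.split(":", 1), then key.split(";")[0]
def pvKeyOf (line : String) : String :=
  ((PySem.Str.split? (((PySem.Str.splitMax? line ":" 1).getD []).headD "") ";").getD []).headD ""
def pvValOf (line : String) : String :=
  (((PySem.Str.splitMax? line ":" 1).getD []).drop 1).headD ""

-- ===== PORT A =====
-- Python's `events.append(current)` appends a REFERENCE: all events appended since the last
-- BEGIN:VEVENT alias the live dict.  The port models this exactly with state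
-- (committed events, number of pending aliased appends, live dict): BEGIN commits the pending
-- copies (now final) and resets; END adds one pending alias; a key:value line updates the live dict.
-- stepALine is A's loop body after `line = line.strip()`.
def stepALine (st : List (PySem.Dict String String) × Nat × PySem.Dict String String)
    (line : String) : List (PySem.Dict String String) × Nat × PySem.Dict String String :=
  if line = "BEGIN:VEVENT" then (st.1 ++ List.replicate st.2.1 st.2.2, 0, PySem.Dict.empty)
  else if line = "END:VEVENT" then (st.1, st.2.1 + 1, st.2.2)
  else if PySem.Str.isIn ":" line then (st.1, st.2.1, st.2.2.insert (pvKeyOf line) (pvValOf line))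
  else st

def stepA (st : List (PySem.Dict String String) × Nat × PySem.Dict String String)
    (raw : String) : List (PySem.Dict String String) × Nat × PySem.Dict String String :=
  stepALine st (PySem.Str.strip raw)

-- second pass of A: reshape one event dict
def renderA (e : PySem.Dict String String) : List (String × Option String) :=
  [("source_id", e.get? "UID"), ("title", e.get? "SUMMARY"), ("event_date", e.get? "DTSTART"),
   ("end_time", e.get? "DTEND"), ("venue", e.get? "LOCATION"), ("description", e.get? "DESCRIPTION")]

def parse_ics (text : String) : List (List (String × Option String)) :=
  let st := (PySem.Str.splitlines text).foldl stepA ([], 0, PySem.Dict.empty)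
  ((st.1 ++ List.replicate st.2.1 st.2.2).map renderA)

-- ===== PORT B =====
-- B's six variables (uid, summary, dtstart, dtend, location, description)
def setFieldB (f : Option String × Option String × Option String × Option String × Option String × Option String)
    (key value : String) :
    Option String × Option String × Option String × Option String × Option String × Option String :=
  if key = "UID" then (some value, f.2.1, f.2.2.1, f.2.2.2.1, f.2.2.2.2.1, f.2.2.2.2.2)
  else if key = "SUMMARY" then (f.1, some value, f.2.2.1, f.2.2.2.1, f.2.2.2.2.1, f.2.2.2.2.2)
  else if key = "DTSTART" then (f.1, f.2.1, some value, f.2.2.2.1, f.2.2.2.2.1, f.2.2.2.2.2)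
  else if key = "DTEND" then (f.1, f.2.1, f.2.2.1, some value, f.2.2.2.2.1, f.2.2.2.2.2)
  else if key = "LOCATION" then (f.1, f.2.1, f.2.2.1, f.2.2.2.1, some value, f.2.2.2.2.2)
  else if key = "DESCRIPTION" then (f.1, f.2.1, f.2.2.1, f.2.2.2.1, f.2.2.2.2.1, some value)
  else f

def emitB (f : Option String × Option String × Option String × Option String × Option String × Option String) :
    List (String × Option String) :=
  [("source_id", f.1), ("title", f.2.1), ("event_date", f.2.2.1),
   ("end_time", f.2.2.2.1), ("venue", f.2.2.2.2.1), ("description", f.2.2.2.2.2)]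

-- B's loop body after `line = raw.strip()`
def stepBLine (st : List (List (String × Option String)) × (Option String × Option String × Option String × Option String × Option String × Option String))
    (line : String) : List (List (String × Option String)) × (Option String × Option String × Option String × Option String × Option String × Option String) :=
  if line = "BEGIN:VEVENT" then (st.1, (none, none, none, none, none, none))
  else if line = "END:VEVENT" then (st.1 ++ [emitB st.2], st.2)
  else if PySem.Str.isIn ":" line then (st.1, setFieldB st.2 (pvKeyOf line) (pvValOf line))
  else st

def stepB (st : List (List (String × Option String)) × (Option String × Option String × Option String × Option String × Option String × Option String))
    (raw : String) : List (List (String × Option String)) × (Option String × Option String × Option String × Option String × Option String × Option String) :=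
  stepBLine st (PySem.Str.strip raw)

def parse_ics_alt (text : String) : List (List (String × Option String)) :=
  ((PySem.Str.splitlines text).foldl stepB ([], (none, none, none, none, none, none))).1

-- ===== PRECONDITION & SPEC =====
-- a stripped line carrying one of the six property keys the parsers read
def pvIsProp6 (line : String) : Bool :=
  PySem.Str.isIn ":" line &&
    (["UID", "SUMMARY", "DTSTART", "DTEND", "LOCATION", "DESCRIPTION"].contains (pvKeyOf line))

-- "an END:VEVENT has been seen after the last BEGIN:VEVENT of the prefix P (if any)"
def pvSeenEnd (flag : Bool) (P : List String) : Bool :=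
  ((P.reverse.takeWhile (· ≠ "BEGIN:VEVENT")).contains "END:VEVENT") ||
    (flag && !(P.contains "BEGIN:VEVENT"))

-- some position j carries one of the six property keys while an END:VEVENT precedes it
-- with no BEGIN:VEVENT in between
def pvScanD (flag : Bool) (L : List String) : Bool :=
  (List.range L.length).any fun j => pvIsProp6 (L.getD j "") && pvSeenEnd flag (L.take j)

-- Pre_ excludes texts in which a UID/SUMMARY/DTSTART/DTEND/LOCATION/DESCRIPTION property line
-- appears after an END:VEVENT and before the next BEGIN:VEVENT: such property lines belong to no
-- event, and whether they still affect the event just closed (A) or are ignored (B) is an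
-- arbitrary choice on malformed input that no specification fixes.
def Pre_parse_ics (text : String) : Prop :=
  pvScanD false (((PySem.Str.splitlines text).map PySem.Str.strip)) = false
instance (text : String) : Decidable (Pre_parse_ics text) := by unfold Pre_parse_ics; infer_instance

def pvWitness_parse_ics : String := "BEGIN:VEVENT\nUID:1\nSUMMARY:show\nEND:VEVENT"

def Spec_parse_ics (text : String) (out : List (List (String × Option String))) : Prop :=
  out = parse_ics_alt text
instance (text : String) (out : List (List (String × Option String))) :
    Decidable (Spec_parse_ics text out) := by unfold Spec_parse_ics; infer_instance

-- ===== CLAIM (what is proved, stated in full; the proofs are below) =====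
def Claim_equal_parse_ics : Prop :=
  ∀ (text : String), Dom_parse_ics text → Pre_parse_ics text → Spec_parse_ics text (parse_ics text)

-- ===== LEMMAS AND PROOFS =====

theorem render_insert (d : PySem.Dict String String)
    (f : Option String × Option String × Option String × Option String × Option String × Option String)
    (h : renderA d = emitB f) (k v : String) :
    renderA (d.insert k v) = emitB (setFieldB f k v) := by
  simp only [renderA, emitB, List.cons.injEq, Prod.mk.injEq, and_true] at h
  obtain ⟨⟨-, h1⟩, ⟨-, h2⟩, ⟨-, h3⟩, ⟨-, h4⟩, ⟨-, h5⟩, ⟨-, h6⟩⟩ := h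
  unfold setFieldB
  split_ifs with e1 e2 e3 e4 e5 e6 <;>
    simp_all [renderA, emitB, PySem.Dict.get?_insert, Ne.symm]

theorem render_empty :
    renderA PySem.Dict.empty = emitB (none, none, none, none, none, none) := by
  simp [renderA, emitB, PySem.Dict.get?_empty]

theorem setFieldB_not6
    (f : Option String × Option String × Option String × Option String × Option String × Option String)
    (k v : String)
    (h : (["UID", "SUMMARY", "DTSTART", "DTEND", "LOCATION", "DESCRIPTION"].contains k) = false) :
    setFieldB f k v = f := by
  simp only [List.contains_eq_mem, List.mem_cons, List.not_mem_nil, or_false,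
    decide_eq_false_iff_not, not_or] at h
  unfold setFieldB
  split_ifs <;> simp_all

-- how pvSeenEnd evolves when one more line is prepended to the rest of the input
def pvNext (flag : Bool) (l : String) : Bool :=
  if l = "BEGIN:VEVENT" then false else if l = "END:VEVENT" then true else flag

theorem seenEnd_cons (flag : Bool) (l : String) (P : List String) :
    pvSeenEnd flag (l :: P) = pvSeenEnd (pvNext flag l) P := by
  unfold pvSeenEnd pvNext
  simp only [List.reverse_cons, List.takeWhile_append]
  by_cases hB : "BEGIN:VEVENT" ∈ P
  · rw [if_neg]
    · split_ifs <;> simp_all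
    · intro hlen
      have := (List.takeWhile_prefix (l := P.reverse)
        (p := fun x => decide (x ≠ "BEGIN:VEVENT"))).eq_of_length hlen
      have hall := List.takeWhile_eq_self_iff.mp this
      have := hall "BEGIN:VEVENT" (by simpa using hB)
      simp at this
  · have hself : List.takeWhile (fun x => !decide (x = "BEGIN:VEVENT")) P.reverse = P.reverse := by
      apply List.takeWhile_eq_self_iff.mpr
      intro x hx
      simp only [Bool.not_eq_eq_eq_not, Bool.not_true, decide_eq_false_iff_not]
      intro he; subst he; exact hB (by simpa using hx)
    rw [if_pos (by simpa using congrArg List.length hself)]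
    by_cases hb : l = "BEGIN:VEVENT"
    · simp [hb, hself, List.takeWhile, hB]
    · by_cases he : l = "END:VEVENT"
      · simp [he, hself, List.takeWhile, hB]
      · have hlE : decide ("END:VEVENT" = l) = false := by simp [Ne.symm he]
        have hlB : decide ("BEGIN:VEVENT" = l) = false := by simp [Ne.symm hb]
        simp [hb, he, hself, List.takeWhile, hB, hlE, hlB]

theorem scanD_cons (flag : Bool) (l : String) (L : List String) :
    pvScanD flag (l :: L) = ((pvIsProp6 l && flag) || pvScanD (pvNext flag l) L) := by
  unfold pvScanD
  simp only [List.length_cons, List.range_succ_eq_map, List.any_cons, List.any_map,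
    Function.comp_def, List.getD_cons_zero, List.getD_cons_succ, List.take_succ_cons,
    List.take_zero, seenEnd_cons]
  congr 1
  simp [pvSeenEnd]

theorem loop_eq (L : List String) :
    ∀ (c : List (PySem.Dict String String)) (p : Nat) (d : PySem.Dict String String)
      (out : List (List (String × Option String)))
      (f : Option String × Option String × Option String × Option String × Option String × Option String),
      renderA d = emitB f →
      out = c.map renderA ++ List.replicate p (emitB f) →
      pvScanD (decide (p ≠ 0)) L = false →
      ((L.foldl stepALine (c, p, d)).1 ++
        List.replicate (L.foldl stepALine (c, p, d)).2.1
          (L.foldl stepALine (c, p, d)).2.2).map renderA =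
      (L.foldl stepBLine (out, f)).1 := by
  induction L with
  | nil =>
    intro c p d out f h1 h2 _
    simp [List.foldl, List.map_append, h2, List.map_replicate, h1]
  | cons l ls ih =>
    intro c p d out f h1 h2 hD
    rw [scanD_cons] at hD
    have hfire : (pvIsProp6 l && decide (p ≠ 0)) = false := by
      cases h : (pvIsProp6 l && decide (p ≠ 0))
      · rfl
      · rw [h] at hD; simp at hD
    have hDrest : pvScanD (pvNext (decide (p ≠ 0)) l) ls = false := by
      cases h : pvScanD (pvNext (decide (p ≠ 0)) l) ls
      · rfl
      · rw [h] at hD; simp at hD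
    simp only [List.foldl]
    by_cases hb : l = "BEGIN:VEVENT"
    · rw [show stepALine (c, p, d) l =
            (c ++ List.replicate p d, 0, PySem.Dict.empty) by simp [stepALine, hb],
          show stepBLine (out, f) l = (out, (none, none, none, none, none, none)) by
            simp [stepBLine, hb]]
      apply ih
      · exact render_empty
      · simp [List.map_append, h2, List.map_replicate, h1]
      · simpa [pvNext, hb] using hDrest
    · by_cases he : l = "END:VEVENT"
      · rw [show stepALine (c, p, d) l = (c, p + 1, d) by simp [stepALine, he],
            show stepBLine (out, f) l = (out ++ [emitB f], f) by simp [stepBLine, he]]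
        apply ih
        · exact h1
        · simp [h2, List.replicate_succ']
        · simpa [pvNext, hb, he] using hDrest
      · have hDrest' : pvScanD (decide (p ≠ 0)) ls = false := by
          simpa [pvNext, hb, he] using hDrest
        by_cases hc : PySem.Str.isIn ":" l = true
        · have hc' : PySem.Chars.isIn [':'] l.toList = true := by simpa using hc
          rw [show stepALine (c, p, d) l =
                (c, p, d.insert (pvKeyOf l) (pvValOf l)) by simp [stepALine, hb, he, hc'],
              show stepBLine (out, f) l =
                (out, setFieldB f (pvKeyOf l) (pvValOf l)) by simp [stepBLine, hb, he, hc']]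
          by_cases hp : p = 0
          · subst hp
            apply ih
            · exact render_insert d f h1 (pvKeyOf l) (pvValOf l)
            · simpa using h2
            · simpa using hDrest'
          · have hp' : decide (p ≠ 0) = true := by simp [hp]
            rw [hp', Bool.and_true] at hfire
            have hkey : (["UID", "SUMMARY", "DTSTART", "DTEND", "LOCATION",
                "DESCRIPTION"].contains (pvKeyOf l)) = false := by
              simpa [pvIsProp6, hc'] using hfire
            rw [setFieldB_not6 f _ _ hkey]
            apply ih
            · rw [render_insert d f h1 (pvKeyOf l) (pvValOf l), setFieldB_not6 f _ _ hkey]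
            · exact h2
            · exact hDrest'
        · have hc' : PySem.Chars.isIn [':'] l.toList = false := by
            simpa using Bool.eq_false_iff.mpr hc
          rw [show stepALine (c, p, d) l = (c, p, d) by simp [stepALine, hb, he, hc'],
              show stepBLine (out, f) l = (out, f) by simp [stepBLine, hb, he, hc']]
          apply ih
          · exact h1
          · exact h2
          · exact hDrest'

-- ===== VERDICT (by name: the statement is the Claim_ definition above) =====
theorem parse_ics_spec : Claim_equal_parse_ics := by
  intro text _ hpre
  unfold Spec_parse_ics parse_ics parse_ics_alt
  have hA : (PySem.Str.splitlines text).foldl stepA ([], 0, PySem.Dict.empty) =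
      ((PySem.Str.splitlines text).map PySem.Str.strip).foldl stepALine ([], 0, PySem.Dict.empty) := by
    rw [List.foldl_map]; rfl
  have hB : (PySem.Str.splitlines text).foldl stepB ([], (none, none, none, none, none, none)) =
      ((PySem.Str.splitlines text).map PySem.Str.strip).foldl stepBLine
        ([], (none, none, none, none, none, none)) := by
    rw [List.foldl_map]; rfl
  rw [hA, hB]
  apply loop_eq ((PySem.Str.splitlines text).map PySem.Str.strip)
    [] 0 PySem.Dict.empty [] (none, none, none, none, none, none) render_empty rfl
  simpa using hpre
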